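-- pv_equiv track=rewrite | github.com/GruWar/password-game | server.py | periodic_elements
-- ===== SOURCE A (Python) =====
-- elements = [
--     "H", "He",
--     "Li", "Be", "B", "C", "N", "O", "F", "Ne",
--     "Na", "Mg", "Al", "Si", "P", "S", "Cl", "K", "Ar",
--     "Ca", "Sc", "Ti", "V", "Cr", "Mn", "Fe", "Ni", "Co", "Cu", "Zn", "Ga", "Ge", "As", "Se", "Br", "Kr",
--     "Rb", "Sr", "Y", "Zr", "Nb", "Mo", "Tc", "Ru", "Rh", "Pd", "Ag", "Cd", "In", "Sn", "Sb", "Te", "I", "Xe",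
--     "Cs", "Ba",
--     "La", "Ce", "Pr", "Nd", "Pm", "Sm", "Eu", "Gd", "Tb", "Dy", "Ho", "Er", "Tm", "Yb", "Lu",
--     "Hf", "Ta", "W", "Re", "Os", "Ir", "Pt", "Au", "Hg", "Tl", "Pb", "Bi", "Po", "At", "Rn",
--     "Fr", "Ra",
--     "Ac", "Th", "Pa", "U", "Np", "Pu", "Am", "Cm", "Bk", "Cf", "Es", "Fm", "Md", "No", "Lr",
--     "Rf", "Db", "Sg", "Bh", "Hs", "Mt", "Ds", "Rg", "Cn", "Nh", "Fl", "Mc", "Lv", "Ts", "Og"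
-- ]
--
-- def periodic_elements(password):
--     count = 0
--     for element in elements:
--         if element in password:
--             count += 1
--     if count >= 2:
--         message = animal_img(password)
--     else:
--         message = "password must have 2 or more elements from periodic table"
--     return message
--
-- def animal_img(password):
--     if "Axolotl" in password:
--         message = "OK"
--     else:
--         message = "password must include name of the animal on the picture"
--     return message
-- ===== SOURCE B (Python) =====
-- ELEMENT_SET = frozenset([
--     "H", "He",
--     "Li", "Be", "B", "C", "N", "O", "F", "Ne",
--     "Na", "Mg", "Al", "Si", "P", "S", "Cl", "K", "Ar",
--     "Ca", "Sc", "Ti", "V", "Cr", "Mn", "Fe", "Ni", "Co", "Cu", "Zn", "Ga", "Ge", "As", "Se", "Br", "Kr",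
--     "Rb", "Sr", "Y", "Zr", "Nb", "Mo", "Tc", "Ru", "Rh", "Pd", "Ag", "Cd", "In", "Sn", "Sb", "Te", "I", "Xe",
--     "Cs", "Ba",
--     "La", "Ce", "Pr", "Nd", "Pm", "Sm", "Eu", "Gd", "Tb", "Dy", "Ho", "Er", "Tm", "Yb", "Lu",
--     "Hf", "Ta", "W", "Re", "Os", "Ir", "Pt", "Au", "Hg", "Tl", "Pb", "Bi", "Po", "At", "Rn",
--     "Fr", "Ra",
--     "Ac", "Th", "Pa", "U", "Np", "Pu", "Am", "Cm", "Bk", "Cf", "Es", "Fm", "Md", "No", "Lr",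
--     "Rf", "Db", "Sg", "Bh", "Hs", "Mt", "Ds", "Rg", "Cn", "Nh", "Fl", "Mc", "Lv", "Ts", "Og"
-- ])
--
-- def periodic_elements(password):
--     n = len(password)
--     windows = set()
--     for k in (1, 2):
--         for i in range(n - k + 1):
--             windows.add(password[i:i + k])
--     found = windows & ELEMENT_SET
--     if len(found) >= 2:
--         if "Axolotl" in password:
--             return "OK"
--         return "password must include name of the animal on the picture"
--     return "password must have 2 or more elements from periodic table"
-- ===== Notes on version B (the rewrite author's own statement) =====
-- stated objective: alternative
-- what changed: Instead of scanning the 118-symbol list and testing each symbol for substring containment, B enumerates the password's length-1 and length-2 windows by index into a set and intersects it with a precomputed frozenset of element symbols, comparing the size of the intersection with 2.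
import Mathlib
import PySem

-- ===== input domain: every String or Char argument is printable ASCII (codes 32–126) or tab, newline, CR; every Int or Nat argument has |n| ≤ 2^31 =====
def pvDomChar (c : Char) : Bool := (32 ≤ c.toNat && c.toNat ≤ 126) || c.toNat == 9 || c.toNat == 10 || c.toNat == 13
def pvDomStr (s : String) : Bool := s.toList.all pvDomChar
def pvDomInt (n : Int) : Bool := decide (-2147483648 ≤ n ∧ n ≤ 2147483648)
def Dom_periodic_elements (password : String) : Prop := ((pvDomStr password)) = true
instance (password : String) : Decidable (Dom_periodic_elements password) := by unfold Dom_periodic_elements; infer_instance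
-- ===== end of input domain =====

-- B inverts A's traversal: instead of scanning the 118-symbol list and testing each symbol for
-- containment, it enumerates the password's length-1 and length-2 windows by index, collects those
-- lying in a precomputed symbol set, and intersects (objective: alternative decomposition).

-- ===== PORT A =====
def pvElems : List String := [
  "H", "He",
  "Li", "Be", "B", "C", "N", "O", "F", "Ne",
  "Na", "Mg", "Al", "Si", "P", "S", "Cl", "K", "Ar",
  "Ca", "Sc", "Ti", "V", "Cr", "Mn", "Fe", "Ni", "Co", "Cu", "Zn", "Ga", "Ge", "As", "Se", "Br", "Kr",
  "Rb", "Sr", "Y", "Zr", "Nb", "Mo", "Tc", "Ru", "Rh", "Pd", "Ag", "Cd", "In", "Sn", "Sb", "Te", "I", "Xe",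
  "Cs", "Ba",
  "La", "Ce", "Pr", "Nd", "Pm", "Sm", "Eu", "Gd", "Tb", "Dy", "Ho", "Er", "Tm", "Yb", "Lu",
  "Hf", "Ta", "W", "Re", "Os", "Ir", "Pt", "Au", "Hg", "Tl", "Pb", "Bi", "Po", "At", "Rn",
  "Fr", "Ra",
  "Ac", "Th", "Pa", "U", "Np", "Pu", "Am", "Cm", "Bk", "Cf", "Es", "Fm", "Md", "No", "Lr",
  "Rf", "Db", "Sg", "Bh", "Hs", "Mt", "Ds", "Rg", "Cn", "Nh", "Fl", "Mc", "Lv", "Ts", "Og"]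

def pvAnimalImg (password : String) : String :=
  if PySem.Str.isIn "Axolotl" password then "OK"
  else "password must include name of the animal on the picture"

def periodic_elements (password : String) : String :=
  let count : Int := pvElems.foldl (fun c e => if PySem.Str.isIn e password then c + 1 else c) 0
  if 2 ≤ count then pvAnimalImg password
  else "password must have 2 or more elements from periodic table"

-- ===== PORT B =====
-- ELEMENT_SET of Source B; PySem strings are List Char, so the frozenset literal is a set of char lists
def pvElemChars : List (List Char) := [
  ['H'], ['H', 'e'], ['L', 'i'], ['B', 'e'], ['B'], ['C'], ['N'], ['O'],
  ['F'], ['N', 'e'], ['N', 'a'], ['M', 'g'], ['A', 'l'], ['S', 'i'], ['P'], ['S'],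
  ['C', 'l'], ['K'], ['A', 'r'], ['C', 'a'], ['S', 'c'], ['T', 'i'], ['V'], ['C', 'r'],
  ['M', 'n'], ['F', 'e'], ['N', 'i'], ['C', 'o'], ['C', 'u'], ['Z', 'n'], ['G', 'a'], ['G', 'e'],
  ['A', 's'], ['S', 'e'], ['B', 'r'], ['K', 'r'], ['R', 'b'], ['S', 'r'], ['Y'], ['Z', 'r'],
  ['N', 'b'], ['M', 'o'], ['T', 'c'], ['R', 'u'], ['R', 'h'], ['P', 'd'], ['A', 'g'], ['C', 'd'],
  ['I', 'n'], ['S', 'n'], ['S', 'b'], ['T', 'e'], ['I'], ['X', 'e'], ['C', 's'], ['B', 'a'],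
  ['L', 'a'], ['C', 'e'], ['P', 'r'], ['N', 'd'], ['P', 'm'], ['S', 'm'], ['E', 'u'], ['G', 'd'],
  ['T', 'b'], ['D', 'y'], ['H', 'o'], ['E', 'r'], ['T', 'm'], ['Y', 'b'], ['L', 'u'], ['H', 'f'],
  ['T', 'a'], ['W'], ['R', 'e'], ['O', 's'], ['I', 'r'], ['P', 't'], ['A', 'u'], ['H', 'g'],
  ['T', 'l'], ['P', 'b'], ['B', 'i'], ['P', 'o'], ['A', 't'], ['R', 'n'], ['F', 'r'], ['R', 'a'],
  ['A', 'c'], ['T', 'h'], ['P', 'a'], ['U'], ['N', 'p'], ['P', 'u'], ['A', 'm'], ['C', 'm'],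
  ['B', 'k'], ['C', 'f'], ['E', 's'], ['F', 'm'], ['M', 'd'], ['N', 'o'], ['L', 'r'], ['R', 'f'],
  ['D', 'b'], ['S', 'g'], ['B', 'h'], ['H', 's'], ['M', 't'], ['D', 's'], ['R', 'g'], ['C', 'n'],
  ['N', 'h'], ['F', 'l'], ['M', 'c'], ['L', 'v'], ['T', 's'], ['O', 'g']]

def pvElementSet : PySem.Set (List Char) := PySem.Set.ofList pvElemChars

def periodic_elements_alt (password : String) : String :=
  let cs := password.toList
  let n : Int := (cs.length : Int)
  let windows : PySem.Set (List Char) :=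
    [(1 : Int), 2].foldl (fun w k =>
      (PySem.List.pyRange 0 (n - k + 1) 1).foldl
        (fun w i => PySem.Set.add w (PySem.List.slice cs (some i) (some (i + k)))) w)
      PySem.Set.empty
  let found := PySem.Set.inter windows pvElementSet
  if 2 ≤ PySem.Set.len found then
    if PySem.Str.isIn "Axolotl" password then "OK"
    else "password must include name of the animal on the picture"
  else "password must have 2 or more elements from periodic table"

-- ===== PRECONDITION & SPEC =====
def Spec_periodic_elements (password : String) (out : String) : Prop := out = periodic_elements_alt password
instance (password : String) (out : String) : Decidable (Spec_periodic_elements password out) := by unfold Spec_periodic_elements; infer_instance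

-- ===== CLAIM (what is proved, stated in full; the proofs are below) =====
def Claim_equal_periodic_elements : Prop := ∀ (password : String), Dom_periodic_elements password → Spec_periodic_elements password (periodic_elements password)

-- ===== LEMMAS AND PROOFS =====

-- the inner 'for i in range(n - k + 1)' loop of Source B
def pvInner (cs : List Char) (k : Int) (w : PySem.Set (List Char)) : PySem.Set (List Char) :=
  (PySem.List.pyRange 0 ((cs.length : Int) - k + 1) 1).foldl
    (fun w i => PySem.Set.add w (PySem.List.slice cs (some i) (some (i + k)))) w

theorem pvWindows_eq (cs : List Char) :
    ([(1 : Int), 2].foldl (fun w k =>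
      (PySem.List.pyRange 0 ((cs.length : Int) - k + 1) 1).foldl
        (fun w i => PySem.Set.add w (PySem.List.slice cs (some i) (some (i + k)))) w)
      PySem.Set.empty) = pvInner cs 2 (pvInner cs 1 PySem.Set.empty) := rfl

theorem mem_pvInner (cs : List Char) (k : Int) (w : PySem.Set (List Char)) (x : List Char) :
    x ∈ pvInner cs k w ↔ x ∈ w ∨
      ∃ i : Int, 0 ≤ i ∧ i < (cs.length : Int) - k + 1 ∧
        x = PySem.List.slice cs (some i) (some (i + k)) := by
  unfold pvInner
  rw [PySem.Set.mem_foldl_add (f := fun i => PySem.List.slice cs (some i) (some (i + k)))]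
  constructor
  · rintro (h | ⟨i, hi, rfl⟩)
    · exact Or.inl h
    · rw [PySem.List.mem_pyRange_one] at hi
      exact Or.inr ⟨i, hi.1, hi.2, rfl⟩
  · rintro (h | ⟨i, h0, h1, rfl⟩)
    · exact Or.inl h
    · exact Or.inr ⟨i, PySem.List.mem_pyRange_one.mpr ⟨h0, h1⟩, rfl⟩

theorem nodup_pvInner (cs : List Char) (k : Int) (w : PySem.Set (List Char)) (h : w.Nodup) :
    (pvInner cs k w).Nodup := by
  unfold pvInner
  generalize PySem.List.pyRange 0 ((cs.length : Int) - k + 1) 1 = l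
  induction l generalizing w with
  | nil => exact h
  | cons i rest ih => exact ih _ (PySem.Set.nodup_add _ _ h)

theorem pvSlice_infix (cs : List Char) (i k : Int) (h0 : 0 ≤ i) (hk : 0 ≤ k) :
    PySem.List.slice cs (some i) (some (i + k)) <:+: cs := by
  rw [PySem.List.slice_toNat cs h0 (by omega)]
  exact ((List.take_prefix _ _).isInfix).trans ((List.drop_suffix _ _).isInfix)

theorem pvInfix_window (cs x : List Char) (k : Nat) (hlen : x.length = k) (hinf : x <:+: cs) :
    ∃ i : Int, 0 ≤ i ∧ i < (cs.length : Int) - (k : Int) + 1 ∧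
      x = PySem.List.slice cs (some i) (some (i + (k : Int))) := by
  obtain ⟨s, t, rfl⟩ := hinf
  refine ⟨(s.length : Int), by positivity, ?_, ?_⟩
  · simp only [List.length_append, hlen]
    push_cast
    omega
  · rw [PySem.List.slice_natCast_add, List.append_assoc, List.drop_left, ← hlen, List.take_left]

-- x of length 1 or 2 is a window of Source B's loops iff it is an infix of the password
theorem mem_windows_iff (cs x : List Char) (hx : x.length = 1 ∨ x.length = 2) :
    x ∈ pvInner cs 2 (pvInner cs 1 PySem.Set.empty) ↔ x <:+: cs := by
  rw [mem_pvInner, mem_pvInner]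
  constructor
  · rintro ((h | ⟨i, h0, _, rfl⟩) | ⟨i, h0, _, rfl⟩)
    · simp [PySem.Set.empty] at h
    · exact pvSlice_infix cs i 1 h0 (by omega)
    · exact pvSlice_infix cs i 2 h0 (by omega)
  · intro hinf
    rcases hx with h1 | h2
    · exact Or.inl (Or.inr (by exact_mod_cast pvInfix_window cs x 1 h1 hinf))
    · exact Or.inr (by exact_mod_cast pvInfix_window cs x 2 h2 hinf)

set_option maxRecDepth 40000 in
theorem pvElemChars_eq : pvElemChars = pvElems.map String.toList := by decide

set_option maxRecDepth 40000 in
theorem pvElemsC_len : ∀ l ∈ pvElems.map String.toList, l.length = 1 ∨ l.length = 2 := by decide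

set_option maxRecDepth 40000 in
theorem pvElemsC_nodup : (pvElems.map String.toList).Nodup := by decide

-- the intersection Source B computes holds exactly the element symbols occurring in the password
theorem mem_found (pw : String) (x : List Char) :
    x ∈ PySem.Set.inter (pvInner pw.toList 2 (pvInner pw.toList 1 PySem.Set.empty)) pvElementSet ↔
      x ∈ pvElems.map String.toList ∧ x <:+: pw.toList := by
  rw [PySem.Set.mem_inter]
  constructor
  · rintro ⟨hw, hS⟩
    have hmem : x ∈ pvElems.map String.toList := by
      rw [← pvElemChars_eq]
      simpa [pvElementSet, PySem.Set.mem_ofList] using hS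
    exact ⟨hmem, (mem_windows_iff _ x (pvElemsC_len x hmem)).mp hw⟩
  · rintro ⟨hmem, hinf⟩
    refine ⟨(mem_windows_iff _ x (pvElemsC_len x hmem)).mpr hinf, ?_⟩
    rw [← pvElemChars_eq] at hmem
    simpa [pvElementSet, PySem.Set.mem_ofList] using hmem

theorem found_length (pw : String) :
    ((PySem.Set.inter (pvInner pw.toList 2 (pvInner pw.toList 1 PySem.Set.empty)) pvElementSet).length : Nat)
      = (pvElems.filter (fun e => PySem.Str.isIn e pw)).length := by
  have hnd : (PySem.Set.inter (pvInner pw.toList 2 (pvInner pw.toList 1 PySem.Set.empty)) pvElementSet).Nodup :=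
    PySem.Set.nodup_inter _ _ (nodup_pvInner _ _ _ (nodup_pvInner _ _ _ (by simp [PySem.Set.empty])))
  have hnd2 : ((pvElems.map String.toList).filter (fun l => PySem.Chars.isIn l pw.toList)).Nodup :=
    pvElemsC_nodup.filter _
  have hperm : (PySem.Set.inter (pvInner pw.toList 2 (pvInner pw.toList 1 PySem.Set.empty)) pvElementSet).Perm
      ((pvElems.map String.toList).filter (fun l => PySem.Chars.isIn l pw.toList)) := by
    rw [List.perm_ext_iff_of_nodup hnd hnd2]
    intro y
    rw [mem_found]
    simp [List.mem_filter, PySem.Chars.isIn_iff_infix]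
  rw [hperm.length_eq, List.filter_map, List.length_map]
  congr 1

-- ===== VERDICT (by name: the statement is the Claim_ definition above) =====
theorem periodic_elements_spec : Claim_equal_periodic_elements := by
  intro pw _
  unfold Spec_periodic_elements
  show periodic_elements pw = periodic_elements_alt pw
  have hc : ((2 : Int) ≤ pvElems.foldl (fun c e => if PySem.Str.isIn e pw then c + 1 else c) 0)
      ↔ (2 ≤ PySem.Set.len (PySem.Set.inter (pvInner pw.toList 2 (pvInner pw.toList 1 PySem.Set.empty)) pvElementSet)) := by
    rw [PySem.List.foldl_count_if]
    have hlen : PySem.Set.len (PySem.Set.inter (pvInner pw.toList 2 (pvInner pw.toList 1 PySem.Set.empty)) pvElementSet)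
        = ((PySem.Set.inter (pvInner pw.toList 2 (pvInner pw.toList 1 PySem.Set.empty)) pvElementSet).length : Int) := by
      simp [PySem.Set.len]
    rw [hlen, List.countP_eq_length_filter, ← found_length pw]
    omega
  simp only [periodic_elements, periodic_elements_alt, pvAnimalImg, pvWindows_eq, hc]
  rfl
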